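-- pv_equiv track=rewrite | github.com/drexlerd/tyr | profiling/report.py | select_case_benchmark
-- ===== SOURCE A (Python) =====
-- def select_case_benchmark(run_name, benchmarks):
--     prefix = f"{run_name}/"
--     for benchmark in benchmarks:
--         if benchmark.get("name", "").startswith(prefix) and benchmark.get("run_type", "iteration") == "iteration":
--             return benchmark
--     for benchmark in benchmarks:
--         if benchmark.get("name", "").startswith(prefix):
--             return benchmark
--     return None
-- ===== SOURCE B (Python) =====
-- def select_case_benchmark(run_name, benchmarks):
--     prefix = f"{run_name}/"
--     fallback = None
--     for benchmark in benchmarks: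
--         if benchmark.get("name", "").startswith(prefix):
--             if benchmark.get("run_type", "iteration") == "iteration":
--                 return benchmark
--             if fallback is None:
--                 fallback = benchmark
--     return fallback
-- ===== Notes on version B (the rewrite author's own statement) =====
-- stated objective: simpler
-- what changed: Replaces A's two sequential scans over the benchmark list with a single pass that returns the first iteration-type prefix match immediately and remembers the first other prefix match in a fallback variable.
import Mathlib
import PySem

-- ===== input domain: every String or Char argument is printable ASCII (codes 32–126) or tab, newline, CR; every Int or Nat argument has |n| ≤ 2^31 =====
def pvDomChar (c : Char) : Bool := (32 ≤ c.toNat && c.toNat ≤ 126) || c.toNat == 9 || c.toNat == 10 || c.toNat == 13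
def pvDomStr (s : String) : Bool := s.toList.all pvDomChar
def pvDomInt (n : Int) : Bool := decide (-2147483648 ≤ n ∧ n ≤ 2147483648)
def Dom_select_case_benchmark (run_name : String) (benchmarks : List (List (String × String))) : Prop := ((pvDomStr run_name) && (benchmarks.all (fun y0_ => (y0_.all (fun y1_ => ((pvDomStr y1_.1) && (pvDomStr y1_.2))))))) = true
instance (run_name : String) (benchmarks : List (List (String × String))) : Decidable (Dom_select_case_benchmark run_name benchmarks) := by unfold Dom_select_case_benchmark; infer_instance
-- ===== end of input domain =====

-- B replaces A's two sequential scans with one pass carrying a fallback; objective: simpler.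
-- dict.get(k, d) on the association list: first match wins (the task's dict convention)
def scbGet (b : List (String × String)) (k : String) (d : String) : String :=
  ((b.find? (fun p => p.1 == k)).map Prod.snd).getD d

-- ===== PORT A =====
def select_case_benchmark (run_name : String) (benchmarks : List (List (String × String))) : Option (List (String × String)) :=
  match benchmarks.find? (fun b =>
      PySem.Str.startswith (scbGet b "name" "") (run_name ++ "/")
        && (scbGet b "run_type" "iteration" == "iteration")) with
  | some b => some b
  | none => benchmarks.find? (fun b => PySem.Str.startswith (scbGet b "name" "") (run_name ++ "/"))

-- ===== PORT B =====
def scbLoop (pre : String) (fallback : Option (List (String × String))) :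
    List (List (String × String)) → Option (List (String × String))
  | [] => fallback
  | b :: rest =>
    if PySem.Str.startswith (scbGet b "name" "") pre then
      if scbGet b "run_type" "iteration" == "iteration" then some b
      else scbLoop pre (if fallback.isNone then some b else fallback) rest
    else scbLoop pre fallback rest

def select_case_benchmark_alt (run_name : String) (benchmarks : List (List (String × String))) : Option (List (String × String)) :=
  scbLoop (run_name ++ "/") none benchmarks

-- ===== PRECONDITION & SPEC =====
def Spec_select_case_benchmark (run_name : String) (benchmarks : List (List (String × String))) (out : Option (List (String × String))) : Prop := out = select_case_benchmark_alt run_name benchmarks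
instance (run_name : String) (benchmarks : List (List (String × String))) (out : Option (List (String × String))) : Decidable (Spec_select_case_benchmark run_name benchmarks out) := by unfold Spec_select_case_benchmark; infer_instance

-- ===== CLAIM (what is proved, stated in full; the proofs are below) =====
def Claim_equal_select_case_benchmark : Prop := ∀ (run_name : String) (benchmarks : List (List (String × String))), Dom_select_case_benchmark run_name benchmarks → Spec_select_case_benchmark run_name benchmarks (select_case_benchmark run_name benchmarks)

-- ===== LEMMAS AND PROOFS =====
theorem scbLoop_eq (pre : String) (fb : Option (List (String × String)))
    (l : List (List (String × String))) :
    scbLoop pre fb l =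
      (l.find? (fun b => PySem.Str.startswith (scbGet b "name" "") pre
          && (scbGet b "run_type" "iteration" == "iteration"))).or
        (fb.or (l.find? (fun b => PySem.Str.startswith (scbGet b "name" "") pre))) := by
  induction l generalizing fb with
  | nil => cases fb <;> rfl
  | cons b rest ih =>
    rw [scbLoop]
    cases hp : PySem.Str.startswith (scbGet b "name" "") pre with
    | false =>
      rw [if_neg Bool.false_ne_true, ih,
        List.find?_cons_of_neg (p := fun b => PySem.Str.startswith (scbGet b "name" "") pre
          && (scbGet b "run_type" "iteration" == "iteration"))
          (by show ¬(PySem.Str.startswith (scbGet b "name" "") pre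
            && (scbGet b "run_type" "iteration" == "iteration")) = true
              rw [hp]; exact Bool.false_ne_true),
        List.find?_cons_of_neg (p := fun b => PySem.Str.startswith (scbGet b "name" "") pre)
          (by show ¬PySem.Str.startswith (scbGet b "name" "") pre = true
              rw [hp]; exact Bool.false_ne_true)]
    | true =>
      rw [if_pos rfl,
        List.find?_cons_of_pos (p := fun b => PySem.Str.startswith (scbGet b "name" "") pre) hp]
      cases hq : (scbGet b "run_type" "iteration" == "iteration") with
      | true =>
        rw [if_pos rfl,
          List.find?_cons_of_pos (p := fun b => PySem.Str.startswith (scbGet b "name" "") pre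
            && (scbGet b "run_type" "iteration" == "iteration"))
            (by show (PySem.Str.startswith (scbGet b "name" "") pre
              && (scbGet b "run_type" "iteration" == "iteration")) = true
                rw [hp, hq]; rfl),
          Option.some_or]
      | false =>
        rw [if_neg Bool.false_ne_true, ih,
          List.find?_cons_of_neg (p := fun b => PySem.Str.startswith (scbGet b "name" "") pre
            && (scbGet b "run_type" "iteration" == "iteration"))
            (by show ¬(PySem.Str.startswith (scbGet b "name" "") pre
              && (scbGet b "run_type" "iteration" == "iteration")) = true
                rw [hp, hq]; exact Bool.false_ne_true)]
        cases fb with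
        | none => rfl
        | some x => rfl

-- ===== VERDICT (by name: the statement is the Claim_ definition above) =====
theorem select_case_benchmark_spec : Claim_equal_select_case_benchmark := by
  intro run_name benchmarks _
  unfold Spec_select_case_benchmark select_case_benchmark select_case_benchmark_alt
  rw [scbLoop_eq, Option.none_or]
  cases benchmarks.find? (fun b =>
      PySem.Str.startswith (scbGet b "name" "") (run_name ++ "/")
        && (scbGet b "run_type" "iteration" == "iteration")) <;> rfl
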